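-- pv_equiv track=rewrite | github.com/nicovince/MagicHexagon | magic_hexagon_solver.py | getUniqCmnElt
-- ===== SOURCE A (Python) =====
-- def getUniqCmnElt(lists):
--     cmn = None
--     flatList = []
--     for l in lists:
--         flatList += l
--     for e in flatList:
--         if flatList.count(e) != 1:
--             if flatList.count(e) == 3 and ((cmn == None) or (cmn == e)):
--                 cmn = e
--             else:
--                 return None
--     return cmn
-- ===== SOURCE B (Python) =====
-- def getUniqCmnElt(lists):
--     flat = sorted(x for l in lists for x in l)
--     res = None
--     i = 0
--     n = len(flat)
--     while i < n:
--         j = i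
--         while j < n and flat[j] == flat[i]:
--             j += 1
--         run = j - i
--         if run == 3:
--             if res is not None:
--                 return None
--             res = flat[i]
--         elif run != 1:
--             return None
--         i = j
--     return res
-- ===== Notes on version B (the rewrite author's own statement) =====
-- stated objective: alternative
-- what changed: Replaces A's repeated flatList.count scanning over the whole flat list with flatten-sort and a single scan over maximal runs of equal consecutive values (run length = multiplicity).
import Mathlib
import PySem

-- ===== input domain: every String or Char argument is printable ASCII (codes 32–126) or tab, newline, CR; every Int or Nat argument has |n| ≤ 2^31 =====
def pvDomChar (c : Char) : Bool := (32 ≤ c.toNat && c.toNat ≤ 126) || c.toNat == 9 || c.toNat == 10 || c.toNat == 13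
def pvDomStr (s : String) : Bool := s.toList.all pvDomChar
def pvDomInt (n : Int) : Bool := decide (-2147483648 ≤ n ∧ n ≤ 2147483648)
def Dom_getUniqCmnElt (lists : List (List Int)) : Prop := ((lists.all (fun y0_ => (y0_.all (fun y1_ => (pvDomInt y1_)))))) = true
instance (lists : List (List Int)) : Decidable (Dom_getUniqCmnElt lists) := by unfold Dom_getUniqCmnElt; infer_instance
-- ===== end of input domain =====

-- B replaces A's repeated flatList.count scanning with flatten-sort and a single scan over
-- maximal runs of equal consecutive values (objective: alternative algorithm, same result).

-- ===== PORT A =====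
-- 'for e in flatList: …' with early return, flatList.count(e) against the whole flat list
def loopA (flat : List Int) : List Int → Option Int → Option Int
  | [], cmn => cmn
  | e :: rest, cmn =>
    if flat.count e ≠ 1 then
      if flat.count e = 3 ∧ (cmn = none ∨ cmn = some e) then
        loopA flat rest (some e)
      else none
    else loopA flat rest cmn

def getUniqCmnElt (lists : List (List Int)) : Option Int :=
  let flatList := lists.foldl (fun acc l => acc ++ l) []
  loopA flatList flatList none

-- ===== PORT B =====
-- the inner 'while flat[j] == flat[i]' run grouping: takeWhile/dropWhile of the current value
def runScan : List Int → Option Int → Option Int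
  | [], res => res
  | x :: xs, res =>
    let run := 1 + (xs.takeWhile (fun y => y == x)).length
    if run = 3 then
      match res with
      | some _ => none
      | none => runScan (xs.dropWhile (fun y => y == x)) (some x)
    else if run = 1 then
      runScan (xs.dropWhile (fun y => y == x)) res
    else none
termination_by S _ => S.length
decreasing_by
  all_goals (simp only [List.length_cons]; exact Nat.lt_succ_of_le (List.length_dropWhile_le _ _))

def getUniqCmnElt_alt (lists : List (List Int)) : Option Int :=
  runScan (PySem.List.sorted (lists.flatMap id) (fun x => x) false) none

-- ===== PRECONDITION & SPEC =====
def Spec_getUniqCmnElt (lists : List (List Int)) (out : Option Int) : Prop := out = getUniqCmnElt_alt lists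
instance (lists : List (List Int)) (out : Option Int) : Decidable (Spec_getUniqCmnElt lists out) := by unfold Spec_getUniqCmnElt; infer_instance

-- ===== CLAIM (what is proved, stated in full; the proofs are below) =====
def Claim_equal_getUniqCmnElt : Prop := ∀ (lists : List (List Int)), Dom_getUniqCmnElt lists → Spec_getUniqCmnElt lists (getUniqCmnElt lists)

-- ===== LEMMAS AND PROOFS =====

-- ---- A side: loopA characterised through multiplicities in the flat list ----
theorem loopA_bad (F : List Int) :
    ∀ (rem : List Int) (cmn : Option Int),
      (∃ e ∈ rem, F.count e ≠ 1 ∧ F.count e ≠ 3) → loopA F rem cmn = none := by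
  intro rem
  induction rem with
  | nil => rintro cmn ⟨e, he, _⟩; simp at he
  | cons h t ih =>
    rintro cmn ⟨e, he, hb1, hb3⟩
    rw [List.mem_cons] at he
    unfold loopA
    by_cases h1 : F.count h ≠ 1
    · rw [if_pos h1]
      by_cases h3 : F.count h = 3 ∧ (cmn = none ∨ cmn = some h)
      · rw [if_pos h3]
        refine ih _ ⟨e, ?_, hb1, hb3⟩
        rcases he with rfl | he
        · exact absurd h3.1 hb3
        · exact he
      · rw [if_neg h3]
    · rw [if_neg h1]
      push_neg at h1
      refine ih _ ⟨e, ?_, hb1, hb3⟩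
      rcases he with rfl | he
      · exact absurd h1 hb1
      · exact he

theorem loopA_second (F : List Int) :
    ∀ (rem : List Int) (a : Int),
      (∃ b ∈ rem, F.count b = 3 ∧ b ≠ a) → loopA F rem (some a) = none := by
  intro rem
  induction rem with
  | nil => rintro a ⟨b, hb, _⟩; simp at hb
  | cons h t ih =>
    rintro a ⟨b, hb, hc3, hba⟩
    rw [List.mem_cons] at hb
    unfold loopA
    by_cases h1 : F.count h ≠ 1
    · rw [if_pos h1]
      by_cases h3 : F.count h = 3 ∧ (some a = none ∨ some a = some h)
      · rw [if_pos h3]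
        rcases h3.2 with h' | h'
        · exact absurd h' (by simp)
        · have hah : a = h := by injection h'
          refine ih h ⟨b, ?_, hc3, by rw [← hah]; exact hba⟩
          rcases hb with rfl | hb
          · exact absurd hah.symm hba
          · exact hb
      · rw [if_neg h3]
    · rw [if_neg h1]
      push_neg at h1
      refine ih a ⟨b, ?_, hc3, hba⟩
      rcases hb with rfl | hb
      · rw [hc3] at h1; exact absurd h1 (by decide)
      · exact hb

theorem loopA_two (F : List Int) :
    ∀ (rem : List Int) (cmn : Option Int),
      (∃ a ∈ rem, ∃ b ∈ rem, F.count a = 3 ∧ F.count b = 3 ∧ a ≠ b) →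
      loopA F rem cmn = none := by
  intro rem
  induction rem with
  | nil => rintro cmn ⟨a, ha, _⟩; simp at ha
  | cons h t ih =>
    rintro cmn ⟨a, ha, b, hb, h3a, h3b, hab⟩
    rw [List.mem_cons] at ha hb
    unfold loopA
    by_cases h1 : F.count h ≠ 1
    · rw [if_pos h1]
      by_cases h3 : F.count h = 3 ∧ (cmn = none ∨ cmn = some h)
      · rw [if_pos h3]
        by_cases hah : a = h
        · have hbh : b ≠ h := by rw [← hah]; exact hab.symm
          have hbt : b ∈ t := hb.resolve_left hbh
          exact loopA_second F t h ⟨b, hbt, h3b, hbh⟩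
        · have hat : a ∈ t := ha.resolve_left hah
          exact loopA_second F t h ⟨a, hat, h3a, hah⟩
      · rw [if_neg h3]
    · rw [if_neg h1]
      push_neg at h1
      have hah : a ≠ h := fun h' => by rw [h', h1] at h3a; exact absurd h3a (by decide)
      have hbh : b ≠ h := fun h' => by rw [h', h1] at h3b; exact absurd h3b (by decide)
      exact ih cmn ⟨a, ha.resolve_left hah, b, hb.resolve_left hbh, h3a, h3b, hab⟩

theorem loopA_good (F : List Int) (c : Int) :
    ∀ (rem : List Int) (cmn : Option Int),
      (∀ e ∈ rem, F.count e = 1 ∨ F.count e = 3) →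
      (∀ e ∈ rem, F.count e = 3 → e = c) →
      (cmn = none ∨ cmn = some c) →
      loopA F rem cmn = if ∃ e ∈ rem, F.count e = 3 then some c else cmn := by
  intro rem
  induction rem with
  | nil => intro cmn _ _ _; simp [loopA]
  | cons h t ih =>
    intro cmn hgood hc hcm
    unfold loopA
    rcases hgood h (List.mem_cons_self) with h1 | h3
    · rw [if_neg (by simp [h1])]
      rw [ih cmn (fun e he => hgood e (List.mem_cons_of_mem _ he))
            (fun e he => hc e (List.mem_cons_of_mem _ he)) hcm]
      have hiff : (∃ e ∈ h :: t, F.count e = 3) ↔ (∃ e ∈ t, F.count e = 3) := by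
        constructor
        · rintro ⟨e, he, h3⟩
          rw [List.mem_cons] at he
          rcases he with rfl | he
          · rw [h1] at h3; exact absurd h3 (by decide)
          · exact ⟨e, he, h3⟩
        · rintro ⟨e, he, h3⟩; exact ⟨e, List.mem_cons_of_mem _ he, h3⟩
      by_cases hex : ∃ e ∈ t, F.count e = 3
      · rw [if_pos hex, if_pos (hiff.mpr hex)]
      · rw [if_neg hex, if_neg (fun h' => hex (hiff.mp h'))]
    · have hhc : h = c := hc h List.mem_cons_self h3
      rw [if_pos (by simp [h3])]
      rw [if_pos ⟨h3, by
        rcases hcm with rfl | rfl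
        · exact Or.inl rfl
        · exact Or.inr (by rw [hhc])⟩]
      rw [ih (some h) (fun e he => hgood e (List.mem_cons_of_mem _ he))
            (fun e he => hc e (List.mem_cons_of_mem _ he)) (Or.inr (by rw [hhc]))]
      have hexS : ∃ e ∈ h :: t, F.count e = 3 := ⟨h, List.mem_cons_self, h3⟩
      rw [if_pos hexS]
      split_ifs <;> simp [hhc]

-- unfolding lemmas for the well-founded runScan
theorem runScan_nil (res : Option Int) : runScan [] res = res := by
  rw [runScan.eq_def]

theorem runScan_cons (x : Int) (xs : List Int) (res : Option Int) :
    runScan (x :: xs) res =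
      if 1 + (xs.takeWhile (fun y => y == x)).length = 3 then
        match res with
        | some _ => none
        | none => runScan (xs.dropWhile (fun y => y == x)) (some x)
      else if 1 + (xs.takeWhile (fun y => y == x)).length = 1 then
        runScan (xs.dropWhile (fun y => y == x)) res
      else none := by
  rw [runScan.eq_def]

-- ---- B side: structure of a sorted list at its head run ----
theorem not_mem_dropWhile_beq (x : Int) :
    ∀ xs : List Int, (∀ y ∈ xs, x ≤ y) → xs.Pairwise (· ≤ ·) →
      x ∉ xs.dropWhile (fun y => y == x) := by
  intro xs
  induction xs with
  | nil => intro _ _; simp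
  | cons y ys ih =>
    intro hle hpw
    rw [List.dropWhile_cons]
    by_cases hyx : (y == x) = true
    · rw [if_pos hyx]
      exact ih (fun z hz => hle z (List.mem_cons_of_mem _ hz)) (List.Pairwise.of_cons hpw)
    · rw [if_neg hyx]
      intro hmem
      rw [List.mem_cons] at hmem
      rcases hmem with rfl | hmem
      · exact hyx (by simp)
      · have h1 : y ≤ x := List.rel_of_pairwise_cons hpw hmem
        have h2 : x ≤ y := hle y List.mem_cons_self
        exact hyx (by simp [le_antisymm h1 h2])

theorem run_facts (x : Int) (xs : List Int)
    (hs : (x :: xs).Pairwise (· ≤ ·)) :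
    (x :: xs).count x = 1 + (xs.takeWhile (fun y => y == x)).length ∧
    (∀ e : Int, e ≠ x → (x :: xs).count e = (xs.dropWhile (fun y => y == x)).count e) ∧
    (∀ e ∈ xs.dropWhile (fun y => y == x), e ∈ x :: xs ∧ e ≠ x) ∧
    (∀ e ∈ x :: xs, e ≠ x → e ∈ xs.dropWhile (fun y => y == x)) ∧
    (xs.dropWhile (fun y => y == x)).Pairwise (· ≤ ·) := by
  rw [List.pairwise_cons] at hs
  obtain ⟨hxle, hpxs⟩ := hs
  have ht : ∀ y ∈ xs.takeWhile (fun y => y == x), y = x := by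
    intro y hy
    have := List.mem_takeWhile_imp hy
    simpa using this
  have hnd : x ∉ xs.dropWhile (fun y => y == x) := not_mem_dropWhile_beq x xs hxle hpxs
  have hsplit : xs.takeWhile (fun y => y == x) ++ xs.dropWhile (fun y => y == x) = xs :=
    List.takeWhile_append_dropWhile
  have hcx : (x :: xs).count x = 1 + (xs.takeWhile (fun y => y == x)).length := by
    have h1 : (xs.takeWhile (fun y => y == x)).count x = (xs.takeWhile (fun y => y == x)).length :=
      List.count_eq_length.mpr (fun b hb => (ht b hb).symm)
    have h2 : (xs.dropWhile (fun y => y == x)).count x = 0 := List.count_eq_zero.mpr hnd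
    have h3 : xs.count x =
        (xs.takeWhile (fun y => y == x)).count x + (xs.dropWhile (fun y => y == x)).count x := by
      rw [← List.count_append, hsplit]
    rw [List.count_cons_self]
    omega
  refine ⟨hcx, ?_, ?_, ?_, ?_⟩
  · intro e hex
    have h1 : (xs.takeWhile (fun y => y == x)).count e = 0 :=
      List.count_eq_zero.mpr (fun hmem => hex (ht e hmem))
    have h3 : xs.count e =
        (xs.takeWhile (fun y => y == x)).count e + (xs.dropWhile (fun y => y == x)).count e := by
      rw [← List.count_append, hsplit]
    have h4 : (x :: xs).count e = xs.count e := by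
      rw [List.count_cons]
      simp [Ne.symm hex]
    omega
  · intro e he
    have hmemxs : e ∈ xs := (List.dropWhile_sublist _).mem he
    refine ⟨List.mem_cons_of_mem _ hmemxs, fun h' => ?_⟩
    rw [h'] at he; exact hnd he
  · intro e he hex
    rw [List.mem_cons] at he
    rcases he with rfl | he
    · exact absurd rfl hex
    · rw [← hsplit, List.mem_append] at he
      rcases he with he | he
      · exact absurd (ht e he) hex
      · exact he
  · exact hpxs.sublist (List.dropWhile_sublist _)

theorem runScan_bad (n : Nat) :
    ∀ (S : List Int), S.length ≤ n → S.Pairwise (· ≤ ·) →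
      (∃ e ∈ S, S.count e ≠ 1 ∧ S.count e ≠ 3) → ∀ res, runScan S res = none := by
  induction n with
  | zero =>
    rintro S hlen _ ⟨e, he, _⟩ res
    rw [List.length_eq_zero_iff.mp (Nat.le_zero.mp hlen)] at he
    simp at he
  | succ n ih =>
    rintro S hlen hs ⟨e, he, h1, h3⟩ res
    cases S with
    | nil => simp at he
    | cons x xs =>
      obtain ⟨hcx, hcne, _, hto, hpd⟩ := run_facts x xs hs
      have hdlen : (xs.dropWhile (fun y => y == x)).length ≤ n := by
        have hd1 := List.length_dropWhile_le (fun y => y == x) xs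
        have hd2 : (x :: xs).length = xs.length + 1 := by simp
        omega
      rw [runScan_cons]
      by_cases hex : e = x
      · subst hex
        rw [if_neg (by rw [← hcx]; exact h3), if_neg (by rw [← hcx]; exact h1)]
      · have hed : e ∈ xs.dropWhile (fun y => y == x) := hto e he hex
        have hbad : ∃ e' ∈ xs.dropWhile (fun y => y == x),
            (xs.dropWhile (fun y => y == x)).count e' ≠ 1 ∧
            (xs.dropWhile (fun y => y == x)).count e' ≠ 3 := by
          refine ⟨e, hed, ?_, ?_⟩ <;> rw [← hcne e hex] <;> assumption
        by_cases hr3 : 1 + (xs.takeWhile (fun y => y == x)).length = 3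
        · rw [if_pos hr3]
          cases res with
          | some a => rfl
          | none => exact ih _ hdlen hpd hbad (some x)
        · rw [if_neg hr3]
          by_cases hr1 : 1 + (xs.takeWhile (fun y => y == x)).length = 1
          · rw [if_pos hr1]
            exact ih _ hdlen hpd hbad res
          · rw [if_neg hr1]

theorem runScan_triple_some (n : Nat) :
    ∀ (S : List Int), S.length ≤ n → S.Pairwise (· ≤ ·) →
      (∃ b ∈ S, S.count b = 3) → ∀ a : Int, runScan S (some a) = none := by
  induction n with
  | zero =>
    rintro S hlen _ ⟨b, hb, _⟩ a
    rw [List.length_eq_zero_iff.mp (Nat.le_zero.mp hlen)] at hb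
    simp at hb
  | succ n ih =>
    rintro S hlen hs ⟨b, hb, h3⟩ a
    cases S with
    | nil => simp at hb
    | cons x xs =>
      obtain ⟨hcx, hcne, _, hto, hpd⟩ := run_facts x xs hs
      have hdlen : (xs.dropWhile (fun y => y == x)).length ≤ n := by
        have h1 := List.length_dropWhile_le (fun y => y == x) xs
        have h2 : (x :: xs).length = xs.length + 1 := by simp
        omega
      rw [runScan_cons]
      by_cases hr3 : 1 + (xs.takeWhile (fun y => y == x)).length = 3
      · rw [if_pos hr3]
      · rw [if_neg hr3]
        have hbx : b ≠ x := by
          intro h'; rw [h'] at h3; rw [hcx] at h3; exact hr3 h3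
        have hbd : b ∈ xs.dropWhile (fun y => y == x) := hto b hb hbx
        have htrip : ∃ b' ∈ xs.dropWhile (fun y => y == x),
            (xs.dropWhile (fun y => y == x)).count b' = 3 :=
          ⟨b, hbd, by rw [← hcne b hbx]; exact h3⟩
        by_cases hr1 : 1 + (xs.takeWhile (fun y => y == x)).length = 1
        · rw [if_pos hr1]
          exact ih _ hdlen hpd htrip a
        · rw [if_neg hr1]

theorem runScan_two (n : Nat) :
    ∀ (S : List Int), S.length ≤ n → S.Pairwise (· ≤ ·) →
      (∃ a ∈ S, ∃ b ∈ S, S.count a = 3 ∧ S.count b = 3 ∧ a ≠ b) →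
      ∀ res, runScan S res = none := by
  induction n with
  | zero =>
    rintro S hlen _ ⟨a, ha, _⟩ res
    rw [List.length_eq_zero_iff.mp (Nat.le_zero.mp hlen)] at ha
    simp at ha
  | succ n ih =>
    rintro S hlen hs ⟨a, ha, b, hb, h3a, h3b, hab⟩ res
    cases S with
    | nil => simp at ha
    | cons x xs =>
      obtain ⟨hcx, hcne, _, hto, hpd⟩ := run_facts x xs hs
      have hdlen : (xs.dropWhile (fun y => y == x)).length ≤ n := by
        have h1 := List.length_dropWhile_le (fun y => y == x) xs
        have h2 : (x :: xs).length = xs.length + 1 := by simp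
        omega
      rw [runScan_cons]
      by_cases hr3 : 1 + (xs.takeWhile (fun y => y == x)).length = 3
      · rw [if_pos hr3]
        cases res with
        | some c => rfl
        | none =>
          have hone : ∃ c, c ≠ x ∧ c ∈ x :: xs ∧ (x :: xs).count c = 3 := by
            by_cases hax : a = x
            · exact ⟨b, by rw [← hax]; exact hab.symm, hb, h3b⟩
            · exact ⟨a, hax, ha, h3a⟩
          obtain ⟨c, hcxne, hcmem, hc3⟩ := hone
          have hcd : c ∈ xs.dropWhile (fun y => y == x) := hto c hcmem hcxne
          exact runScan_triple_some _ _ le_rfl hpd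
            ⟨c, hcd, by rw [← hcne c hcxne]; exact hc3⟩ x
      · rw [if_neg hr3]
        by_cases hr1 : 1 + (xs.takeWhile (fun y => y == x)).length = 1
        · rw [if_pos hr1]
          have hcx1 : (x :: xs).count x = 1 := by rw [hcx, hr1]
          have hax : a ≠ x := fun h' => by rw [h', hcx1] at h3a; exact absurd h3a (by decide)
          have hbx : b ≠ x := fun h' => by rw [h', hcx1] at h3b; exact absurd h3b (by decide)
          refine ih _ hdlen hpd ⟨a, hto a ha hax, b, hto b hb hbx, ?_, ?_, hab⟩ res
          · rw [← hcne a hax]; exact h3a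
          · rw [← hcne b hbx]; exact h3b
        · rw [if_neg hr1]

theorem runScan_all_one (n : Nat) :
    ∀ (S : List Int), S.length ≤ n → S.Pairwise (· ≤ ·) →
      (∀ e ∈ S, S.count e = 1) → ∀ res, runScan S res = res := by
  induction n with
  | zero =>
    intro S hlen _ _ res
    rw [List.length_eq_zero_iff.mp (Nat.le_zero.mp hlen)]
    simp [runScan_nil]
  | succ n ih =>
    intro S hlen hs hone res
    cases S with
    | nil => simp [runScan_nil]
    | cons x xs =>
      obtain ⟨hcx, hcne, hfrom, _, hpd⟩ := run_facts x xs hs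
      have hdlen : (xs.dropWhile (fun y => y == x)).length ≤ n := by
        have h1 := List.length_dropWhile_le (fun y => y == x) xs
        have h2 : (x :: xs).length = xs.length + 1 := by simp
        omega
      rw [runScan_cons]
      have hr1 : 1 + (xs.takeWhile (fun y => y == x)).length = 1 := by
        rw [← hcx]; exact hone x List.mem_cons_self
      rw [if_neg (by omega), if_pos hr1]
      refine ih _ hdlen hpd ?_ res
      intro e he
      obtain ⟨hmem, hex⟩ := hfrom e he
      rw [← hcne e hex]
      exact hone e hmem

theorem runScan_good (n : Nat) :
    ∀ (S : List Int), S.length ≤ n → S.Pairwise (· ≤ ·) →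
      (∀ e ∈ S, S.count e = 1 ∨ S.count e = 3) →
      ∀ c : Int, (∀ e ∈ S, S.count e = 3 → e = c) →
      runScan S none = if ∃ e ∈ S, S.count e = 3 then some c else none := by
  induction n with
  | zero =>
    intro S hlen _ _ c _
    rw [List.length_eq_zero_iff.mp (Nat.le_zero.mp hlen)]
    simp [runScan_nil]
  | succ n ih =>
    intro S hlen hs hgood c hc
    cases S with
    | nil => simp [runScan_nil]
    | cons x xs =>
      obtain ⟨hcx, hcne, hfrom, hto, hpd⟩ := run_facts x xs hs
      have hdlen : (xs.dropWhile (fun y => y == x)).length ≤ n := by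
        have h1 := List.length_dropWhile_le (fun y => y == x) xs
        have h2 : (x :: xs).length = xs.length + 1 := by simp
        omega
      rw [runScan_cons]
      rcases hgood x List.mem_cons_self with h1 | h3
      · -- head has multiplicity 1
        have hr1 : 1 + (xs.takeWhile (fun y => y == x)).length = 1 := by rw [← hcx]; exact h1
        rw [if_neg (by omega), if_pos hr1]
        rw [ih _ hdlen hpd
            (fun e he => by rw [← hcne e (hfrom e he).2]; exact hgood e (hfrom e he).1) c
            (fun e he h3' => hc e (hfrom e he).1 (by rw [hcne e (hfrom e he).2]; exact h3'))]
        have hiff : (∃ e ∈ x :: xs, (x :: xs).count e = 3) ↔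
            (∃ e ∈ xs.dropWhile (fun y => y == x),
              (xs.dropWhile (fun y => y == x)).count e = 3) := by
          constructor
          · rintro ⟨e, he, h3'⟩
            have hex : e ≠ x := fun h' => by rw [h', h1] at h3'; exact absurd h3' (by decide)
            exact ⟨e, hto e he hex, by rw [← hcne e hex]; exact h3'⟩
          · rintro ⟨e, he, h3'⟩
            exact ⟨e, (hfrom e he).1, by rw [hcne e (hfrom e he).2]; exact h3'⟩
        by_cases hex : ∃ e ∈ xs.dropWhile (fun y => y == x),
            (xs.dropWhile (fun y => y == x)).count e = 3
        · rw [if_pos hex, if_pos (hiff.mpr hex)]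
        · rw [if_neg hex, if_neg (fun h' => hex (hiff.mp h'))]
      · -- head has multiplicity 3: it is the unique common element
        have hxc : x = c := hc x List.mem_cons_self h3
        have hr3 : 1 + (xs.takeWhile (fun y => y == x)).length = 3 := by rw [← hcx]; exact h3
        rw [if_pos hr3]
        have hdone : ∀ e ∈ xs.dropWhile (fun y => y == x),
            (xs.dropWhile (fun y => y == x)).count e = 1 := by
          intro e he
          obtain ⟨hmem, hex⟩ := hfrom e he
          rcases hgood e hmem with h | h
          · rw [← hcne e hex]; exact h
          · exact absurd (hc e hmem h) (by rw [hxc] at hex; exact hex)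
        rw [runScan_all_one _ _ le_rfl hpd hdone (some x)]
        rw [if_pos ⟨x, List.mem_cons_self, h3⟩, hxc]

theorem getUniqCmnElt_eq_alt (lists : List (List Int)) :
    getUniqCmnElt lists = getUniqCmnElt_alt lists := by
  unfold getUniqCmnElt getUniqCmnElt_alt
  rw [PySem.List.foldl_append_eq_flatMap (fun l => l) lists []]
  simp only [List.nil_append]
  have hid : lists.flatMap id = lists.flatMap (fun l => l) := rfl
  rw [hid]
  set F := lists.flatMap (fun l => l) with hF
  set S := PySem.List.sorted F (fun x => x) false with hS
  have hperm : S.Perm F := PySem.List.sorted_perm F (fun x => x) false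
  have hpw : S.Pairwise (· ≤ ·) := PySem.List.sorted_pairwise F (fun x => x)
  have hcnt : ∀ e : Int, S.count e = F.count e := fun e => hperm.count_eq e
  have hmem : ∀ e : Int, e ∈ S ↔ e ∈ F := fun e => hperm.mem_iff
  by_cases hbad : ∃ e ∈ F, F.count e ≠ 1 ∧ F.count e ≠ 3
  · obtain ⟨e, he, h1, h3⟩ := hbad
    rw [loopA_bad F F none ⟨e, he, h1, h3⟩,
        runScan_bad S.length S le_rfl hpw
          ⟨e, (hmem e).mpr he, by rw [hcnt e]; exact h1, by rw [hcnt e]; exact h3⟩ none]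
  · push_neg at hbad
    have hgood : ∀ e ∈ F, F.count e = 1 ∨ F.count e = 3 := by
      intro e he
      by_cases h : F.count e = 1
      · exact Or.inl h
      · exact Or.inr (hbad e he h)
    by_cases htwo : ∃ a ∈ F, ∃ b ∈ F, F.count a = 3 ∧ F.count b = 3 ∧ a ≠ b
    · obtain ⟨a, ha, b, hb, h3a, h3b, hab⟩ := htwo
      rw [loopA_two F F none ⟨a, ha, b, hb, h3a, h3b, hab⟩,
          runScan_two S.length S le_rfl hpw
            ⟨a, (hmem a).mpr ha, b, (hmem b).mpr hb,
             by rw [hcnt a]; exact h3a, by rw [hcnt b]; exact h3b, hab⟩ none]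
    · push_neg at htwo
      have hSgood : ∀ e ∈ S, S.count e = 1 ∨ S.count e = 3 := by
        intro e he; rw [hcnt e]; exact hgood e ((hmem e).mp he)
      by_cases hex : ∃ c ∈ F, F.count c = 3
      · obtain ⟨c, hcF, hc3⟩ := hex
        have huniq : ∀ e ∈ F, F.count e = 3 → e = c := by
          intro e he h3
          exact htwo e he c hcF h3 hc3
        rw [loopA_good F c F none hgood huniq (Or.inl rfl)]
        rw [runScan_good S.length S le_rfl hpw hSgood c
            (fun e he h3 => huniq e ((hmem e).mp he) (by rw [← hcnt e]; exact h3))]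
        rw [if_pos ⟨c, hcF, hc3⟩, if_pos ⟨c, (hmem c).mpr hcF, by rw [hcnt c]; exact hc3⟩]
      · have huniq0 : ∀ e ∈ F, F.count e = 3 → e = 0 := by
          intro e he h3; exact absurd ⟨e, he, h3⟩ hex
        rw [loopA_good F 0 F none hgood huniq0 (Or.inl rfl)]
        rw [runScan_good S.length S le_rfl hpw hSgood 0
            (fun e he h3 => huniq0 e ((hmem e).mp he) (by rw [← hcnt e]; exact h3))]
        rw [if_neg hex, if_neg (fun ⟨e, he, h3⟩ =>
          hex ⟨e, (hmem e).mp he, by rw [← hcnt e]; exact h3⟩)]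

-- ===== VERDICT (by name: the statement is the Claim_ definition above) =====
theorem getUniqCmnElt_spec : Claim_equal_getUniqCmnElt := by
  intro lists _
  unfold Spec_getUniqCmnElt
  exact getUniqCmnElt_eq_alt lists
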